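-- pv_equiv track=rewrite | github.com/Morfildor/regcheck-api | rules.py | _text_evidenced_traits
-- ===== SOURCE A (Python) =====
-- TEXT_EVIDENCE_STATES = ("text_explicit", "text_inferred")
--
-- RADIO_ROUTE_TRAITS = {
--     "radio",
--     "wifi",
--     "wifi_5ghz",
--     "wifi_6",
--     "wifi_7",
--     "bluetooth",
--     "zigbee",
--     "thread",
--     "matter",
--     "nfc",
--     "cellular",
--     "dect",
--     "gsm",
--     "uwb",
--     "5g_nr",
--     "lora",
--     "lorawan",
--     "sigfox",
--     "lte_m",
--     "satellite_connectivity",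
-- }
--
-- def _text_evidenced_traits(state_map: dict[str, dict[str, list[str]]]) -> set[str]:
--     evidenced: set[str] = set()
--     for state in TEXT_EVIDENCE_STATES:
--         evidenced.update(state_map.get(state, {}).keys())
--
--     if evidenced & (RADIO_ROUTE_TRAITS - {"radio"}):
--         evidenced.add("radio")
--     if evidenced & {"wifi_5ghz", "wifi_6", "wifi_7"}:
--         evidenced.add("wifi")
--     if evidenced & {"gsm", "lte_m", "5g_nr"}:
--         evidenced.add("cellular")
--     if "lorawan" in evidenced:
--         evidenced.add("lora")
--     if evidenced & {"cloud", "ota", "internet_connected"}: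
--         evidenced.update({"internet", "internet_connected"})
--     return evidenced
-- ===== SOURCE B (Python) =====
-- TEXT_EVIDENCE_STATES = ("text_explicit", "text_inferred")
--
-- RADIO_ROUTE_TRAITS = {
--     "radio", "wifi", "wifi_5ghz", "wifi_6", "wifi_7", "bluetooth", "zigbee",
--     "thread", "matter", "nfc", "cellular", "dect", "gsm", "uwb", "5g_nr",
--     "lora", "lorawan", "sigfox", "lte_m", "satellite_connectivity",
-- }
--
-- # Closure rules as a data table: (trigger set, traits to add when it is hit).
-- _CLOSURE_RULES = [
--     (RADIO_ROUTE_TRAITS - {"radio"}, {"radio"}),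
--     ({"wifi_5ghz", "wifi_6", "wifi_7"}, {"wifi"}),
--     ({"gsm", "lte_m", "5g_nr"}, {"cellular"}),
--     ({"lorawan"}, {"lora"}),
--     ({"cloud", "ota", "internet_connected"}, {"internet", "internet_connected"}),
-- ]
--
-- def _text_evidenced_traits(state_map: dict[str, dict[str, list[str]]]) -> set[str]:
--     traits: set[str] = set()
--     for state in TEXT_EVIDENCE_STATES:
--         traits |= state_map.get(state, {}).keys()
--     # iterate the rule table to a fixed point (|rules| passes always suffice)
--     for _ in _CLOSURE_RULES:
--         before = len(traits)
--         for trigger, additions in _CLOSURE_RULES: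
--             if traits & trigger:
--                 traits |= additions
--         if len(traits) == before:
--             break
--     return traits
-- ===== Notes on version B (the rewrite author's own statement) =====
-- stated objective: alternative
-- what changed: Replaces A's hard-coded chain of five if-statements by a data table of (trigger, additions) closure rules iterated to a fixed point with an early break when a pass adds nothing.
import Mathlib
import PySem

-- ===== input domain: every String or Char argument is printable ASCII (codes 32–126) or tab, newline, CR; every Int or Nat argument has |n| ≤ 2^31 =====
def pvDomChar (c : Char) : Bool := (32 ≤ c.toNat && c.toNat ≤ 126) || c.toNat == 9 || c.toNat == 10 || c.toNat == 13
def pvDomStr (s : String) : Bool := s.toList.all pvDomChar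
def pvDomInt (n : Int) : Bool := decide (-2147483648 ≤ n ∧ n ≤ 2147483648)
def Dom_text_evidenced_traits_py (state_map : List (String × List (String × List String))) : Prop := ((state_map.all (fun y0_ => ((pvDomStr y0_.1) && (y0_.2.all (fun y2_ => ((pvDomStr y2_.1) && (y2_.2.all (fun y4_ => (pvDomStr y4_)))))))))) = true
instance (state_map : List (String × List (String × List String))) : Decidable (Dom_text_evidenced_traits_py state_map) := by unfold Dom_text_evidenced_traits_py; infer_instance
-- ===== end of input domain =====

-- B replaces A's hard-coded chain of five ifs by a rule table iterated to a fixed point (objective: alternative decomposition).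

-- module constants shared by both Pythons
def pvTextStates : List String := ["text_explicit", "text_inferred"]

def pvRadioRouteTraits : PySem.Set String :=
  PySem.Set.ofList ["radio", "wifi", "wifi_5ghz", "wifi_6", "wifi_7", "bluetooth",
    "zigbee", "thread", "matter", "nfc", "cellular", "dect", "gsm", "uwb", "5g_nr",
    "lora", "lorawan", "sigfox", "lte_m", "satellite_connectivity"]

-- Python truthiness of 's & t' (the intersection is non-empty); used by both ports
def pvHits (s : PySem.Set String) (t : List String) : Bool :=
  !(PySem.Set.inter s t).isEmpty

-- ===== PORT A =====
def text_evidenced_traits_py (state_map : List (String × List (String × List String))) : List String :=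
  -- for state in TEXT_EVIDENCE_STATES: evidenced.update(state_map.get(state, {}).keys())
  let evidenced : PySem.Set String :=
    pvTextStates.foldl
      (fun ev state => PySem.Set.update ev (PySem.Dict.keys (PySem.Dict.mk (((PySem.Dict.mk state_map).get? state).getD []))))
      PySem.Set.empty
  let evidenced := if pvHits evidenced (PySem.Set.diff pvRadioRouteTraits ["radio"]) then
    PySem.Set.add evidenced "radio" else evidenced
  let evidenced := if pvHits evidenced ["wifi_5ghz", "wifi_6", "wifi_7"] then
    PySem.Set.add evidenced "wifi" else evidenced
  let evidenced := if pvHits evidenced ["gsm", "lte_m", "5g_nr"] then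
    PySem.Set.add evidenced "cellular" else evidenced
  let evidenced := if PySem.Set.contains evidenced "lorawan" then
    PySem.Set.add evidenced "lora" else evidenced
  let evidenced := if pvHits evidenced ["cloud", "ota", "internet_connected"] then
    PySem.Set.update evidenced ["internet", "internet_connected"] else evidenced
  evidenced

-- ===== PORT B =====
def pvClosureRules : List (List String × List String) :=
  [ (PySem.Set.diff pvRadioRouteTraits ["radio"], ["radio"]),
    (["wifi_5ghz", "wifi_6", "wifi_7"], ["wifi"]),
    (["gsm", "lte_m", "5g_nr"], ["cellular"]),
    (["lorawan"], ["lora"]),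
    (["cloud", "ota", "internet_connected"], ["internet", "internet_connected"]) ]

-- one inner 'for trigger, additions in _CLOSURE_RULES' pass
def pvClosurePass (s : PySem.Set String) : PySem.Set String :=
  pvClosureRules.foldl
    (fun s rule => if pvHits s rule.1 then PySem.Set.update s rule.2 else s) s

-- 'for _ in _CLOSURE_RULES: … if len(traits) == before: break'
def pvClosureLoop : Nat → PySem.Set String → PySem.Set String
  | 0, s => s
  | n + 1, s =>
    let before := s.length
    let s' := pvClosurePass s
    if s'.length = before then s' else pvClosureLoop n s'

def text_evidenced_traits_py_alt (state_map : List (String × List (String × List String))) : List String :=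
  let traits : PySem.Set String :=
    pvTextStates.foldl
      (fun t state => PySem.Set.update t (PySem.Dict.keys (PySem.Dict.mk (((PySem.Dict.mk state_map).get? state).getD []))))
      PySem.Set.empty
  pvClosureLoop pvClosureRules.length traits

-- ===== PRECONDITION & SPEC =====
def Spec_text_evidenced_traits_py (state_map : List (String × List (String × List String))) (out : List String) : Prop := out = text_evidenced_traits_py_alt state_map
instance (state_map : List (String × List (String × List String))) (out : List String) : Decidable (Spec_text_evidenced_traits_py state_map out) := by unfold Spec_text_evidenced_traits_py; infer_instance

-- ===== CLAIM (what is proved, stated in full; the proofs are below) =====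
def Claim_equal_text_evidenced_traits_py : Prop := ∀ (state_map : List (String × List (String × List String))), Dom_text_evidenced_traits_py state_map → Spec_text_evidenced_traits_py state_map (text_evidenced_traits_py state_map)

-- ===== LEMMAS AND PROOFS =====

theorem pvHits_iff (s : PySem.Set String) (t : List String) :
    pvHits s t = true ↔ ∃ x ∈ s, x ∈ t := by
  simp [pvHits, List.eq_nil_iff_forall_not_mem, PySem.Set.mem_inter]

theorem pvHits_singleton (s : PySem.Set String) (a : String) :
    pvHits s [a] = PySem.Set.contains s a := by
  have h1 : pvHits s [a] = true ↔ a ∈ s := by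
    rw [pvHits_iff]; simp
  cases hb : PySem.Set.contains s a
  · rw [Bool.eq_false_iff]
    intro hh
    have hc : PySem.Set.contains s a = true := (PySem.Set.contains_iff s a).mpr (h1.mp hh)
    rw [hb] at hc
    exact absurd hc (by decide)
  · exact h1.mpr ((PySem.Set.contains_iff s a).mp hb)

theorem pvHits_mono {s s' : PySem.Set String} {t : List String}
    (hsub : ∀ x ∈ s, x ∈ s') (h : pvHits s t = true) : pvHits s' t = true := by
  rcases (pvHits_iff s t).mp h with ⟨x, hx, hxt⟩
  exact (pvHits_iff s' t).mpr ⟨x, hsub x hx, hxt⟩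

-- the step of one rule only grows the set
theorem pvStep_mono (s : PySem.Set String) (r : List String × List String) (x : String)
    (hx : x ∈ s) : x ∈ (if pvHits s r.1 then PySem.Set.update s r.2 else s) := by
  split
  · exact (PySem.Set.mem_update _ _ _).mpr (Or.inl hx)
  · exact hx

theorem pvFoldl_mono (rules : List (List String × List String)) (s : PySem.Set String)
    (x : String) (hx : x ∈ s) :
    x ∈ rules.foldl (fun s rule => if pvHits s rule.1 then PySem.Set.update s rule.2 else s) s := by
  induction rules generalizing s with
  | nil => exact hx
  | cons hd tl ih => exact ih _ (pvStep_mono s hd x hx)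

-- a rule whose trigger is already hit at s deposits all its additions in the fold's result
theorem pvFoldl_fires (rules : List (List String × List String)) (s : PySem.Set String)
    (r : List String × List String) (hr : r ∈ rules) (hh : pvHits s r.1 = true)
    (a : String) (ha : a ∈ r.2) :
    a ∈ rules.foldl (fun s rule => if pvHits s rule.1 then PySem.Set.update s rule.2 else s) s := by
  induction rules generalizing s with
  | nil => cases hr
  | cons hd tl ih =>
    rcases List.mem_cons.mp hr with rfl | hr'
    · refine pvFoldl_mono tl _ a ?_
      simp only [pvHits_mono (fun x hx => hx) hh, if_true]
      exact (PySem.Set.mem_update _ _ _).mpr (Or.inr ha)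
    · exact ih _ hr' (pvHits_mono (pvStep_mono s hd) hh)

-- every element of the fold's result is either old or was added by a rule that fired;
-- a fired rule's trigger is hit at the result and all its additions are in the result
theorem pvFoldl_fired (rules : List (List String × List String)) (s : PySem.Set String)
    (x : String)
    (hx : x ∈ rules.foldl (fun s rule => if pvHits s rule.1 then PySem.Set.update s rule.2 else s) s) :
    x ∈ s ∨ ∃ r ∈ rules, x ∈ r.2 ∧
      pvHits (rules.foldl (fun s rule => if pvHits s rule.1 then PySem.Set.update s rule.2 else s) s) r.1 = true ∧
      ∀ b ∈ r.2, b ∈ rules.foldl (fun s rule => if pvHits s rule.1 then PySem.Set.update s rule.2 else s) s := by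
  induction rules generalizing s with
  | nil => exact Or.inl hx
  | cons hd tl ih =>
    simp only [List.foldl_cons] at hx ⊢
    rcases ih _ hx with hx' | ⟨r, hr, hxr, hhit, hall⟩
    · by_cases h : pvHits s hd.1 = true
      · rw [if_pos h] at hx'
        rcases (PySem.Set.mem_update _ _ _).mp hx' with hs | hadd
        · exact Or.inl hs
        · refine Or.inr ⟨hd, List.mem_cons_self .., hadd, ?_, ?_⟩
          · exact pvHits_mono (fun y hy => pvFoldl_mono tl _ y (pvStep_mono s hd y hy)) h
          · intro b hb
            refine pvFoldl_mono tl _ b ?_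
            rw [if_pos h]
            exact (PySem.Set.mem_update _ _ _).mpr (Or.inr hb)
      · rw [if_neg h] at hx'
        exact Or.inl hx'
    · exact Or.inr ⟨r, List.mem_cons_of_mem _ hr, hxr, hhit, hall⟩

-- a saturated set is a fixed point of the fold
theorem pvFoldl_nochange (rules : List (List String × List String)) (s : PySem.Set String)
    (h : ∀ r ∈ rules, pvHits s r.1 = true → ∀ a ∈ r.2, a ∈ s) :
    rules.foldl (fun s rule => if pvHits s rule.1 then PySem.Set.update s rule.2 else s) s = s := by
  induction rules with
  | nil => rfl
  | cons hd tl ih =>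
    have hstep : (if pvHits s hd.1 then PySem.Set.update s hd.2 else s) = s := by
      split
      · next hh =>
        rw [PySem.Set.update_eq_append_filter]
        have : (PySem.Set.ofList hd.2).filter (fun y => !(PySem.Set.contains s y)) = [] := by
          rw [List.filter_eq_nil_iff]
          intro y hy
          have hys : y ∈ s := h hd (List.mem_cons_self ..) hh y ((PySem.Set.mem_ofList _ _).mp hy)
          simpa using hys
        rw [this, List.append_nil]
      · rfl
    simp only [List.foldl_cons, hstep]
    exact ih fun r hr => h r (List.mem_cons_of_mem _ hr)

def pvAllAdds : List String := ["radio", "wifi", "cellular", "lora", "internet", "internet_connected"]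

theorem pvMem_pass_cases (s : PySem.Set String) (x : String) (hx : x ∈ pvClosurePass s) :
    x ∈ s ∨ x ∈ pvAllAdds := by
  rcases pvFoldl_fired _ _ _ hx with h | ⟨r, hr, hxr, -, -⟩
  · exact Or.inl h
  · right
    fin_cases hr <;> simp_all [pvAllAdds]

-- a trigger disjoint from every possible addition that is hit after the pass was hit before it
theorem pvPure_trigger (s : PySem.Set String) (t : List String)
    (ht : ∀ a ∈ pvAllAdds, a ∉ t) (h : pvHits (pvClosurePass s) t = true) :
    pvHits s t = true := by
  rcases (pvHits_iff _ t).mp h with ⟨x, hx, hxt⟩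
  rcases pvMem_pass_cases s x hx with hs | hadd
  · exact (pvHits_iff s t).mpr ⟨x, hs, hxt⟩
  · exact absurd hxt (ht x hadd)

theorem pvClosurePass_eq (s : PySem.Set String) :
    pvClosurePass s = pvClosureRules.foldl
      (fun s rule => if pvHits s rule.1 then PySem.Set.update s rule.2 else s) s := rfl

-- any rule of the table that is hit at s deposits its additions in pvClosurePass s
theorem pvPass_fires (s : PySem.Set String) (r : List String × List String)
    (hr : r ∈ pvClosureRules) (hh : pvHits s r.1 = true) (a : String) (ha : a ∈ r.2) :
    a ∈ pvClosurePass s := by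
  rw [pvClosurePass_eq]
  exact pvFoldl_fires pvClosureRules s r hr hh a ha

-- a hit of the radio trigger after the pass implies 'radio' is already in the pass's result
theorem pvHits_radio (s : PySem.Set String)
    (h : pvHits (pvClosurePass s) (PySem.Set.diff pvRadioRouteTraits ["radio"]) = true) :
    "radio" ∈ pvClosurePass s := by
  have fire1 : pvHits s (PySem.Set.diff pvRadioRouteTraits ["radio"]) = true →
      "radio" ∈ pvClosurePass s := fun hh =>
    pvPass_fires s (PySem.Set.diff pvRadioRouteTraits ["radio"], ["radio"]) (by decide) hh
      "radio" (by decide)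
  rcases (pvHits_iff _ _).mp h with ⟨x, hx, hxT⟩
  rw [pvClosurePass_eq] at hx
  rcases pvFoldl_fired pvClosureRules s x hx with hxs | ⟨r', hr', hx2, hhit', hall⟩
  · exact fire1 ((pvHits_iff _ _).mpr ⟨x, hxs, hxT⟩)
  · rw [← pvClosurePass_eq] at hhit'
    fin_cases hr'
    · -- rule 1 added x = "radio": but "radio" is not in the trigger
      simp at hx2; subst hx2; exact absurd hxT (by decide)
    · -- rule 2 added x = "wifi": its trigger was hit before the pass and lies inside the radio trigger
      have h2 : pvHits s ["wifi_5ghz", "wifi_6", "wifi_7"] = true :=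
        pvPure_trigger s _ (by decide) hhit'
      rcases (pvHits_iff _ _).mp h2 with ⟨y, hy, hyT⟩
      simp at hyT
      rcases hyT with rfl | rfl | rfl <;>
        exact fire1 ((pvHits_iff _ _).mpr ⟨_, hy, by decide⟩)
    · -- rule 3 added x = "cellular"
      have h3 : pvHits s ["gsm", "lte_m", "5g_nr"] = true :=
        pvPure_trigger s _ (by decide) hhit'
      rcases (pvHits_iff _ _).mp h3 with ⟨y, hy, hyT⟩
      simp at hyT
      rcases hyT with rfl | rfl | rfl <;>
        exact fire1 ((pvHits_iff _ _).mpr ⟨_, hy, by decide⟩)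
    · -- rule 4 added x = "lora"
      have h4 : pvHits s ["lorawan"] = true :=
        pvPure_trigger s _ (by decide) hhit'
      rcases (pvHits_iff _ _).mp h4 with ⟨y, hy, hyT⟩
      simp at hyT; subst hyT
      exact fire1 ((pvHits_iff _ _).mpr ⟨_, hy, by decide⟩)
    · -- rule 5 added x ∈ {"internet", "internet_connected"}: neither is in the radio trigger
      simp at hx2
      rcases hx2 with rfl | rfl <;> exact absurd hxT (by decide)

-- a hit of the internet trigger after the pass implies both additions are already there
theorem pvHits_internet (s : PySem.Set String)
    (h : pvHits (pvClosurePass s) ["cloud", "ota", "internet_connected"] = true) :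
    ∀ a ∈ (["internet", "internet_connected"] : List String), a ∈ pvClosurePass s := by
  rcases (pvHits_iff _ _).mp h with ⟨x, hx, hxT⟩
  rw [pvClosurePass_eq] at hx
  rcases pvFoldl_fired pvClosureRules s x hx with hxs | ⟨r', hr', hx2, hhit', hall⟩
  · exact fun a ha =>
      pvPass_fires s (["cloud", "ota", "internet_connected"], ["internet", "internet_connected"])
        (by decide) ((pvHits_iff _ _).mpr ⟨x, hxs, hxT⟩) a ha
  · fin_cases hr'
    · simp at hx2; subst hx2; exact absurd hxT (by decide)
    · simp at hx2; subst hx2; exact absurd hxT (by decide)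
    · simp at hx2; subst hx2; exact absurd hxT (by decide)
    · simp at hx2; subst hx2; exact absurd hxT (by decide)
    · -- rule 5 itself fired: everything it adds is in the result
      intro a ha
      rw [pvClosurePass_eq]
      exact hall a ha

-- one pass of the rule table already reaches the fixed point
theorem pvClosurePass_idem (s : PySem.Set String) :
    pvClosurePass (pvClosurePass s) = pvClosurePass s := by
  rw [pvClosurePass_eq (pvClosurePass s)]
  refine pvFoldl_nochange pvClosureRules (pvClosurePass s) ?_
  intro r hr hhit a ha
  fin_cases hr
  · simp at ha; subst ha
    exact pvHits_radio s hhit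
  · simp at ha; subst ha
    exact pvPass_fires s (["wifi_5ghz", "wifi_6", "wifi_7"], ["wifi"]) (by decide)
      (pvPure_trigger s _ (by decide) hhit) "wifi" (by decide)
  · simp at ha; subst ha
    exact pvPass_fires s (["gsm", "lte_m", "5g_nr"], ["cellular"]) (by decide)
      (pvPure_trigger s _ (by decide) hhit) "cellular" (by decide)
  · simp at ha; subst ha
    exact pvPass_fires s (["lorawan"], ["lora"]) (by decide)
      (pvPure_trigger s _ (by decide) hhit) "lora" (by decide)
  · exact pvHits_internet s hhit a ha

theorem pvClosureLoop_succ (n : Nat) (s : PySem.Set String) :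
    pvClosureLoop (n + 1) s =
      if (pvClosurePass s).length = s.length then pvClosurePass s
      else pvClosureLoop n (pvClosurePass s) := rfl

-- the bounded loop with early break computes exactly one pass
theorem pvClosureLoop_eq_pass (s : PySem.Set String) :
    pvClosureLoop pvClosureRules.length s = pvClosurePass s := by
  show pvClosureLoop (4 + 1) s = pvClosurePass s
  rw [pvClosureLoop_succ]
  split_ifs with h
  · rfl
  · show pvClosureLoop (3 + 1) (pvClosurePass s) = pvClosurePass s
    rw [pvClosureLoop_succ, pvClosurePass_idem]
    simp

-- ===== VERDICT (by name: the statement is the Claim_ definition above) =====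
theorem text_evidenced_traits_py_spec : Claim_equal_text_evidenced_traits_py := by
  intro sm _
  show text_evidenced_traits_py sm = text_evidenced_traits_py_alt sm
  simp only [text_evidenced_traits_py_alt]
  rw [pvClosureLoop_eq_pass]
  simp only [text_evidenced_traits_py, pvClosurePass_eq, pvClosureRules, List.foldl_cons,
    List.foldl_nil, pvHits_singleton, PySem.Set.update_cons, PySem.Set.update_nil]
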